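-- pv_equiv track=rewrite | github.com/adudacoelho/PROG2-tabelas- | tabela.py | relatorio
-- ===== SOURCE A (Python) =====
-- def relatorio(tabV, tabP):
--
--     tabR = []
--     for i in range(len(tabP)):
--         p = []
--         p.append(tabP[i][1])
--         p.append(tabP[i][2])
--         c = []
--         for j in range(len(tabV)):
--             carros = []
--             if tabP[i][0] == tabV[j][3]:
--                 carros.append(tabV[j][0])
--                 carros.append(tabV[j][1])
--                 carros.append(tabV[j][2])
--                 c.append(carros)
--         p.append(c)
--         tabR.append(p)
--     return tabR
-- ===== SOURCE B (Python) =====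
-- def relatorio(tabV, tabP):
--     groups = {}
--     for v in tabV:
--         groups.setdefault(v[3], []).append([v[0], v[1], v[2]])
--     return [[p[1], p[2], groups.get(p[0], [])] for p in tabP]
-- ===== Notes on version B (the rewrite author's own statement) =====
-- stated objective: alternative
-- what changed: Replaces the nested scan of tabV for every tabP row by a single grouping pass building a dict keyed on tabV[j][3], then one map over tabP with a lookup.
import Mathlib
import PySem

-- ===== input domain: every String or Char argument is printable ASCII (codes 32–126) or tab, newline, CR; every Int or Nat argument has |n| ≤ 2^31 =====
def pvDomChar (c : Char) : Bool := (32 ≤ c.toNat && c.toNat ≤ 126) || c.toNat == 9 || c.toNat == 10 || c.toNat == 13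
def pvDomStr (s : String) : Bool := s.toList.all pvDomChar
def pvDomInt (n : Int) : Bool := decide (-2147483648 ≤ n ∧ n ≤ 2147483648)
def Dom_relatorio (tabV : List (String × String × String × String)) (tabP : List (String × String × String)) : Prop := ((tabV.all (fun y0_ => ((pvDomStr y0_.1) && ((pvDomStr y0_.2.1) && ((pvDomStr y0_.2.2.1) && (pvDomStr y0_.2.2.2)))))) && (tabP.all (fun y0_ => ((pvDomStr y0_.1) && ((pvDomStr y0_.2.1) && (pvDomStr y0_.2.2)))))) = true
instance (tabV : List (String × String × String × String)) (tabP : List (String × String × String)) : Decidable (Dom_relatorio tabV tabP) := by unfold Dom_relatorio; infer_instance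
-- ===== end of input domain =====

-- B replaces A's nested scan of tabV per tabP row by one grouping pass (a dict keyed on
-- tabV[j][3]) followed by a single map over tabP with a lookup (objective: alternative).

-- ===== PORT A =====
-- A: for each tabP row, scan all of tabV appending matching rows to c, append the row to tabR.
def relatorio (tabV : List (String × String × String × String)) (tabP : List (String × String × String)) : List (String × String × (List (String × String × String))) :=
  tabP.foldl (fun tabR p =>
    let c := tabV.foldl (fun c v =>
      if p.1 == v.2.2.2 then c ++ [(v.1, v.2.1, v.2.2.1)] else c) []
    tabR ++ [(p.2.1, p.2.2, c)]) []

-- ===== PORT B =====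
-- B helper: one pass over tabV doing groups.setdefault(v[3], []).append([v0, v1, v2])
def pvGroups (tabV : List (String × String × String × String)) : PySem.Dict String (List (String × String × String)) :=
  tabV.foldl (fun g v =>
    g.modify v.2.2.2 [] (fun l => l ++ [(v.1, v.2.1, v.2.2.1)])) PySem.Dict.empty

def relatorio_alt (tabV : List (String × String × String × String)) (tabP : List (String × String × String)) : List (String × String × (List (String × String × String))) :=
  let groups := pvGroups tabV
  tabP.map (fun p => (p.2.1, p.2.2, groups.getD p.1 []))

-- ===== PRECONDITION & SPEC =====
def Spec_relatorio (tabV : List (String × String × String × String)) (tabP : List (String × String × String)) (out : List (String × String × (List (String × String × String)))) : Prop := out = relatorio_alt tabV tabP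
instance (tabV : List (String × String × String × String)) (tabP : List (String × String × String)) (out : List (String × String × (List (String × String × String)))) : Decidable (Spec_relatorio tabV tabP out) := by unfold Spec_relatorio; infer_instance

-- ===== CLAIM (what is proved, stated in full; the proofs are below) =====
def Claim_equal_relatorio : Prop := ∀ (tabV : List (String × String × String × String)) (tabP : List (String × String × String)), Dom_relatorio tabV tabP → Spec_relatorio tabV tabP (relatorio tabV tabP)

-- ===== LEMMAS AND PROOFS =====

-- the rows of tabV matching key k, in scan order
def pvSel (k : String) (tabV : List (String × String × String × String)) : List (String × String × String) :=
  (tabV.filter (fun v => k == v.2.2.2)).map (fun v => (v.1, v.2.1, v.2.2.1))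

-- A's inner loop computes acc ++ pvSel k tabV
theorem pvInnerA (k : String) (tabV : List (String × String × String × String)) (acc : List (String × String × String)) :
    tabV.foldl (fun c v => if k == v.2.2.2 then c ++ [(v.1, v.2.1, v.2.2.1)] else c) acc
      = acc ++ pvSel k tabV := by
  induction tabV generalizing acc with
  | nil => simp [pvSel]
  | cons v vs ih =>
    rw [List.foldl_cons, ih]
    by_cases h : (k == v.2.2.2)
    · simp [pvSel, h]
    · simp [pvSel, h]

-- the grouping dict's lookup at k is exactly the matching rows of tabV, after any starting dict d
theorem pvGroups_getD_gen (tabV : List (String × String × String × String))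
    (d : PySem.Dict String (List (String × String × String))) (k : String) :
    (tabV.foldl (fun g v => g.modify v.2.2.2 [] (fun l => l ++ [(v.1, v.2.1, v.2.2.1)])) d).getD k []
      = d.getD k [] ++ pvSel k tabV := by
  induction tabV generalizing d with
  | nil => simp [pvSel]
  | cons v vs ih =>
    rw [List.foldl_cons, ih]
    rw [PySem.Dict.getD_modify]
    by_cases h : k = v.2.2.2
    · subst h
      simp [pvSel, List.filter]
    · have hb : (k == v.2.2.2) = false := by simp [h]
      simp [h, pvSel, List.filter, hb]

theorem pvGroups_getD (tabV : List (String × String × String × String)) (k : String) :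
    (pvGroups tabV).getD k [] = pvSel k tabV := by
  have := pvGroups_getD_gen tabV PySem.Dict.empty k
  simpa [pvGroups, PySem.Dict.empty, PySem.Dict.getD, PySem.Dict.get?] using this

-- A's outer append-loop is a map
theorem pvOuterA (tabV : List (String × String × String × String)) (tabP : List (String × String × String)) (acc : List (String × String × (List (String × String × String)))) :
    tabP.foldl (fun tabR p =>
        let c := tabV.foldl (fun c v => if p.1 == v.2.2.2 then c ++ [(v.1, v.2.1, v.2.2.1)] else c) []
        tabR ++ [(p.2.1, p.2.2, c)]) acc
      = acc ++ tabP.map (fun p => (p.2.1, p.2.2, pvSel p.1 tabV)) := by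
  induction tabP generalizing acc with
  | nil => simp
  | cons p ps ih =>
    rw [List.foldl_cons, ih, pvInnerA]
    simp

-- ===== VERDICT (by name: the statement is the Claim_ definition above) =====
theorem relatorio_spec : Claim_equal_relatorio := by
  intro tabV tabP _
  show relatorio tabV tabP = relatorio_alt tabV tabP
  rw [relatorio, relatorio_alt, pvOuterA]
  simp [pvGroups_getD]
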